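-- pv_equiv track=rewrite | github.com/Thilac01/news_SIGNALS | news_SIGNALS/app/services/data_processor.py | tag_ops
-- ===== SOURCE A (Python) =====
-- OPERATIONAL_KEYWORDS = {
--     "weather": [
--         "flood", "storm", "cyclone", "landslide", "rain", "drought", "monsoon",
--         "weather", "forecast", "climate", "reservoir", "dam", "water level",
--         "irrigation", "rainfall", "atmospheric", "meteorological", "temperature",
--         "heat", "wind", "warning", "alert", "disaster", "natural hazard",
--         "tsunami", "earthquake", "humidity", "precipitation"
--     ],
--     "transport": [
--         "traffic", "accident", "train", "bus", "highway", "road", "railway",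
--         "airport", "flight", "transport", "vehicle", "locomotive", "station",
--         "port", "shipping", "cargo", "freight", "airline", "aviation", "driver",
--         "passenger", "commute", "expressway", "bridge", "tunnel", "logistics",
--         "fleet", "transit", "ticket", "departure", "arrival", "collision"
--     ],
--     "energy": [
--         "outage", "power", "water cut", "fuel", "gas", "electricity", "energy",
--         "oil", "petrol", "diesel", "utility", "grid", "ceb", "cpc", "renewable",
--         "solar", "wind power", "hydro", "coal", "plant", "refinery", "cylinder",
--         "shortage", "tariff", "bill", "generation", "breakdown", "maintenance",
--         "supply", "kerosene", "litro", "laugfs", "station"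
--     ],
--     "health": [
--         "disease", "infection", "hospital", "medical", "health", "virus",
--         "pandemic", "dengue", "medicine", "doctor", "nurse", "clinic", "patient",
--         "treatment", "drug", "pharmaceutical", "vaccine", "surgery", "emergency",
--         "ambulance", "ministry of health", "nutrition", "wellness", "mental health",
--         "sanitation", "hygiene", "epidemic", "fever", "cancer", "diabetes"
--     ],
--     "security": [
--         "crime", "arrest", "violence", "attack", "police", "military", "security",
--         "defense", "navy", "army", "court", "legal", "law", "enforcement",
--         "custody", "prison", "jail", "suspect", "investigation", "cid", "air force",
--         "troops", "border", "smuggling", "illegal", "operation", "weapon", "drug bust",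
--         "narcotics", "terrorism", "intelligence", "officer"
--     ],
--     "economic": [
--         "inflation", "investment", "trade", "market", "stock", "currency",
--         "rupee", "bank", "interest rate", "economy", "finance", "tax", "budget",
--         "gdp", "cpi", "colombo stock exchange", "cse", "shares", "bond", "treasury",
--         "debt", "loan", "imf", "world bank", "central bank", "cbsl", "export",
--         "import", "customs", "tariff", "duty", "salary", "wage", "price", "cost",
--         "business", "industry", "profit", "loss", "funding"
--     ],
--     "sentiment": [
--         "protest", "public opinion", "social media", "trend", "viral", "sentiment",
--         "outcry", "campaign", "boycott", "strike", "demonstration",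
--         "poll", "survey", "election", "vote", "voter", "community", "social",
--         "society", "civil", "rights", "activist", "union", "opposition",
--         "demand", "petition", "complaint", "feedback", "review", "comment",
--         "discussion", "debate", "speech", "rally", "march", "gathering",
--         "movement", "public", "people", "citizens", "population",
--         "government", "president", "minister", "parliament", "policy",
--         "issue", "concern", "crisis", "develop", "situation", "matter"
--     ]
-- }
--
-- def tag_ops(text):
--     tags = []
--     text = str(text).lower()
--     for category, words in OPERATIONAL_KEYWORDS.items():
--         for w in words:
--             if w in text:
--                 tags.append(category)
--                 break
--     return ", ".join(tags) if tags else "general"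
-- ===== SOURCE B (Python) =====
-- # Keyword data packed as comma-joined strings per category, split once at import;
-- # tagging is a single position-major pass over the text with a hashed
-- # keyword->categories index instead of one substring search per keyword.
-- _RAW = {
--     "weather": "flood,storm,cyclone,landslide,rain,drought,monsoon,weather,forecast,climate,reservoir,dam,water level,irrigation,rainfall,atmospheric,meteorological,temperature,heat,wind,warning,alert,disaster,natural hazard,tsunami,earthquake,humidity,precipitation",
--     "transport": "traffic,accident,train,bus,highway,road,railway,airport,flight,transport,vehicle,locomotive,station,port,shipping,cargo,freight,airline,aviation,driver,passenger,commute,expressway,bridge,tunnel,logistics,fleet,transit,ticket,departure,arrival,collision",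
--     "energy": "outage,power,water cut,fuel,gas,electricity,energy,oil,petrol,diesel,utility,grid,ceb,cpc,renewable,solar,wind power,hydro,coal,plant,refinery,cylinder,shortage,tariff,bill,generation,breakdown,maintenance,supply,kerosene,litro,laugfs,station",
--     "health": "disease,infection,hospital,medical,health,virus,pandemic,dengue,medicine,doctor,nurse,clinic,patient,treatment,drug,pharmaceutical,vaccine,surgery,emergency,ambulance,ministry of health,nutrition,wellness,mental health,sanitation,hygiene,epidemic,fever,cancer,diabetes",
--     "security": "crime,arrest,violence,attack,police,military,security,defense,navy,army,court,legal,law,enforcement,custody,prison,jail,suspect,investigation,cid,air force,troops,border,smuggling,illegal,operation,weapon,drug bust,narcotics,terrorism,intelligence,officer",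
--     "economic": "inflation,investment,trade,market,stock,currency,rupee,bank,interest rate,economy,finance,tax,budget,gdp,cpi,colombo stock exchange,cse,shares,bond,treasury,debt,loan,imf,world bank,central bank,cbsl,export,import,customs,tariff,duty,salary,wage,price,cost,business,industry,profit,loss,funding",
--     "sentiment": "protest,public opinion,social media,trend,viral,sentiment,outcry,campaign,boycott,strike,demonstration,poll,survey,election,vote,voter,community,social,society,civil,rights,activist,union,opposition,demand,petition,complaint,feedback,review,comment,discussion,debate,speech,rally,march,gathering,movement,public,people,citizens,population,government,president,minister,parliament,policy,issue,concern,crisis,develop,situation,matter",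
-- }
--
-- # Built once: keyword -> list of its categories, and the distinct keyword lengths.
-- _CATS = list(_RAW)
-- _KW2CATS = {}
-- for _cat, _packed in _RAW.items():
--     for _w in _packed.split(","):
--         _KW2CATS.setdefault(_w, []).append(_cat)
-- _LENS = sorted({len(_w) for _w in _KW2CATS})
--
--
-- def tag_ops(text):
--     # one pass over the text; hashed keyword lookup per (position, length)
--     t = str(text).lower()
--     n = len(t)
--     hit = set()
--     for i in range(n):
--         for L in _LENS:
--             if L <= n - i:
--                 hit.update(_KW2CATS.get(t[i:i + L], ()))
--     tags = [c for c in _CATS if c in hit]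
--     return ", ".join(tags) if tags else "general"
-- ===== Notes on version B (the rewrite author's own statement) =====
-- stated objective: alternative
-- what changed: A scans the text once per keyword (keyword-major, 245 substring searches); B packs each category's keywords into one comma-joined string, splits them once at import into a keyword-to-categories dictionary plus the set of distinct keyword lengths, then makes a single position-major pass over the text, hashing each candidate slice and filtering the category list by the hit set.
import Mathlib
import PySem

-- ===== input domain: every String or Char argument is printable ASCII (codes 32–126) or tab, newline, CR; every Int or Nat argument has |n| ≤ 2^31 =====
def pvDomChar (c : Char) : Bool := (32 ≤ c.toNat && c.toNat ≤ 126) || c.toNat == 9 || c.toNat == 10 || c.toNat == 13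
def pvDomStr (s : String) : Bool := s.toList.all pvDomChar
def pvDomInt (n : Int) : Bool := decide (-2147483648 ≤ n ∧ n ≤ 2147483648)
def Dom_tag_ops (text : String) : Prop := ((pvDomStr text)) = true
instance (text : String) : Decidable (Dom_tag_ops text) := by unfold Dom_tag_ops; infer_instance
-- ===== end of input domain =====

-- B replaces A's keyword-major scan (one substring search per keyword) by a position-major
-- single pass with a precomputed keyword→categories dictionary built from comma-packed
-- keyword strings; alternative algorithm, not measured faster in Python.

-- ===== PORT A =====
-- OPERATIONAL_KEYWORDS (a literal dict with distinct keys), as its items list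
def pvTable : List (String × List String) := [
  ("weather", ["flood", "storm", "cyclone", "landslide", "rain", "drought", "monsoon",
    "weather", "forecast", "climate", "reservoir", "dam", "water level",
    "irrigation", "rainfall", "atmospheric", "meteorological", "temperature",
    "heat", "wind", "warning", "alert", "disaster", "natural hazard",
    "tsunami", "earthquake", "humidity", "precipitation"]),
  ("transport", ["traffic", "accident", "train", "bus", "highway", "road", "railway",
    "airport", "flight", "transport", "vehicle", "locomotive", "station",
    "port", "shipping", "cargo", "freight", "airline", "aviation", "driver",
    "passenger", "commute", "expressway", "bridge", "tunnel", "logistics",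
    "fleet", "transit", "ticket", "departure", "arrival", "collision"]),
  ("energy", ["outage", "power", "water cut", "fuel", "gas", "electricity", "energy",
    "oil", "petrol", "diesel", "utility", "grid", "ceb", "cpc", "renewable",
    "solar", "wind power", "hydro", "coal", "plant", "refinery", "cylinder",
    "shortage", "tariff", "bill", "generation", "breakdown", "maintenance",
    "supply", "kerosene", "litro", "laugfs", "station"]),
  ("health", ["disease", "infection", "hospital", "medical", "health", "virus",
    "pandemic", "dengue", "medicine", "doctor", "nurse", "clinic", "patient",
    "treatment", "drug", "pharmaceutical", "vaccine", "surgery", "emergency",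
    "ambulance", "ministry of health", "nutrition", "wellness", "mental health",
    "sanitation", "hygiene", "epidemic", "fever", "cancer", "diabetes"]),
  ("security", ["crime", "arrest", "violence", "attack", "police", "military", "security",
    "defense", "navy", "army", "court", "legal", "law", "enforcement",
    "custody", "prison", "jail", "suspect", "investigation", "cid", "air force",
    "troops", "border", "smuggling", "illegal", "operation", "weapon", "drug bust",
    "narcotics", "terrorism", "intelligence", "officer"]),
  ("economic", ["inflation", "investment", "trade", "market", "stock", "currency",
    "rupee", "bank", "interest rate", "economy", "finance", "tax", "budget",
    "gdp", "cpi", "colombo stock exchange", "cse", "shares", "bond", "treasury",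
    "debt", "loan", "imf", "world bank", "central bank", "cbsl", "export",
    "import", "customs", "tariff", "duty", "salary", "wage", "price", "cost",
    "business", "industry", "profit", "loss", "funding"]),
  ("sentiment", ["protest", "public opinion", "social media", "trend", "viral", "sentiment",
    "outcry", "campaign", "boycott", "strike", "demonstration",
    "poll", "survey", "election", "vote", "voter", "community", "social",
    "society", "civil", "rights", "activist", "union", "opposition",
    "demand", "petition", "complaint", "feedback", "review", "comment",
    "discussion", "debate", "speech", "rally", "march", "gathering",
    "movement", "public", "people", "citizens", "population",
    "government", "president", "minister", "parliament", "policy",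
    "issue", "concern", "crisis", "develop", "situation", "matter"])]

-- A's inner 'for w in words: if w in text: …; break' as a first-hit recursion
def pvAnyWord (t : String) : List String → Bool
  | [] => false
  | w :: ws => if PySem.Str.isIn w t then true else pvAnyWord t ws

def tag_ops (text : String) : String :=
  let t := PySem.Str.lower text
  let tags : List String :=
    pvTable.foldl (fun tags cw => if pvAnyWord t cw.2 then tags ++ [cw.1] else tags) []
  if tags = [] then "general" else PySem.Str.join ", " tags

-- ===== PORT B =====
-- _RAW: category -> comma-joined keyword string, as its items list
def pvRawB : List (String × String) := [
  ("weather", "flood,storm,cyclone,landslide,rain,drought,monsoon,weather,forecast,climate,reservoir,dam,water level,irrigation,rainfall,atmospheric,meteorological,temperature,heat,wind,warning,alert,disaster,natural hazard,tsunami,earthquake,humidity,precipitation"),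
  ("transport", "traffic,accident,train,bus,highway,road,railway,airport,flight,transport,vehicle,locomotive,station,port,shipping,cargo,freight,airline,aviation,driver,passenger,commute,expressway,bridge,tunnel,logistics,fleet,transit,ticket,departure,arrival,collision"),
  ("energy", "outage,power,water cut,fuel,gas,electricity,energy,oil,petrol,diesel,utility,grid,ceb,cpc,renewable,solar,wind power,hydro,coal,plant,refinery,cylinder,shortage,tariff,bill,generation,breakdown,maintenance,supply,kerosene,litro,laugfs,station"),
  ("health", "disease,infection,hospital,medical,health,virus,pandemic,dengue,medicine,doctor,nurse,clinic,patient,treatment,drug,pharmaceutical,vaccine,surgery,emergency,ambulance,ministry of health,nutrition,wellness,mental health,sanitation,hygiene,epidemic,fever,cancer,diabetes"),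
  ("security", "crime,arrest,violence,attack,police,military,security,defense,navy,army,court,legal,law,enforcement,custody,prison,jail,suspect,investigation,cid,air force,troops,border,smuggling,illegal,operation,weapon,drug bust,narcotics,terrorism,intelligence,officer"),
  ("economic", "inflation,investment,trade,market,stock,currency,rupee,bank,interest rate,economy,finance,tax,budget,gdp,cpi,colombo stock exchange,cse,shares,bond,treasury,debt,loan,imf,world bank,central bank,cbsl,export,import,customs,tariff,duty,salary,wage,price,cost,business,industry,profit,loss,funding"),
  ("sentiment", "protest,public opinion,social media,trend,viral,sentiment,outcry,campaign,boycott,strike,demonstration,poll,survey,election,vote,voter,community,social,society,civil,rights,activist,union,opposition,demand,petition,complaint,feedback,review,comment,discussion,debate,speech,rally,march,gathering,movement,public,people,citizens,population,government,president,minister,parliament,policy,issue,concern,crisis,develop,situation,matter")]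

-- _CATS = list(_RAW)
def pvCats : List String := pvRawB.map (fun p => p.1)

-- _KW2CATS: keyword -> list of its categories, built with setdefault(w, []).append(cat)
def pvKw2Cats : PySem.Dict String (List String) :=
  pvRawB.foldl
    (fun d p => ((PySem.Str.split? p.2 ",").getD []).foldl (fun d w => d.modify w [] (fun cs => cs ++ [p.1])) d)
    PySem.Dict.empty

-- _LENS = sorted({len(w) for w in _KW2CATS})
def pvLens : List Int :=
  PySem.List.sorted (PySem.Set.ofList (pvKw2Cats.keys.map (fun w => PySem.Str.len w)))
    (fun x => x) false

def tag_ops_alt (text : String) : String :=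
  let t := PySem.Str.lower text
  let n := PySem.Str.len t
  let hit : PySem.Set String :=
    (PySem.List.pyRange 0 n 1).foldl (fun hit i =>
      pvLens.foldl (fun hit L =>
        if L ≤ n - i then
          PySem.Set.update hit (pvKw2Cats.getD (PySem.Str.slice t (some i) (some (i + L))) [])
        else hit) hit) PySem.Set.empty
  let tags : List String := pvCats.filter (fun c => PySem.Set.contains hit c)
  if tags = [] then "general" else PySem.Str.join ", " tags

-- ===== PRECONDITION & SPEC =====
def Spec_tag_ops (text : String) (out : String) : Prop := out = tag_ops_alt text
instance (text : String) (out : String) : Decidable (Spec_tag_ops text out) := by unfold Spec_tag_ops; infer_instance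

-- ===== CLAIM (what is proved, stated in full; the proofs are below) =====
def Claim_equal_tag_ops : Prop := ∀ (text : String), Dom_tag_ops text → Spec_tag_ops text (tag_ops text)

-- ===== LEMMAS AND PROOFS =====

-- B's packed strings split back into exactly A's keyword lists.
-- pvSplit is a plain structural comma-splitter; Chars.splitOn (fuel-based) is bridged to it
-- so the kernel checks the splits over the fast structural function, one category at a time.
def pvSplit : List Char → List (List Char)
  | [] => [[]]
  | c :: rest => if c = ',' then [] :: pvSplit rest else (pvSplit rest).modifyHead (fun x => c :: x)

theorem pvGoStep (fuel : Nat) (c : Char) (rest cur : List Char) (acc : List (List Char)) :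
    PySem.Chars.splitOn.go [','] (fuel+1) (c::rest) cur acc
      = if [','].isPrefixOf (c::rest) then
          PySem.Chars.splitOn.go [','] fuel rest [] (cur.reverse :: acc)
        else PySem.Chars.splitOn.go [','] fuel rest (c :: cur) acc := rfl

theorem pvGoNil (fuel : Nat) (cur : List Char) (acc : List (List Char)) :
    PySem.Chars.splitOn.go [','] (fuel+1) [] cur acc = (cur.reverse :: acc).reverse := rfl

theorem pvGoComma (fuel : Nat) (l cur : List Char) (acc : List (List Char)) (h : l.length < fuel) :
    PySem.Chars.splitOn.go [','] fuel l cur acc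
      = acc.reverse ++ (pvSplit l).modifyHead (fun x => cur.reverse ++ x) := by
  induction fuel generalizing l cur acc with
  | zero => omega
  | succ fuel ih =>
    cases l with
    | nil =>
      rw [pvGoNil]
      simp [pvSplit]
    | cons c rest =>
      rw [pvGoStep]
      have hrest : rest.length < fuel := by simp at h; omega
      by_cases hc : c = ','
      · subst hc
        rw [if_pos (by simp [List.isPrefixOf]), ih _ _ _ hrest]
        simp only [pvSplit, List.reverse_cons, List.append_assoc, List.reverse_nil,
          List.nil_append, List.cons_append]
        cases pvSplit rest <;> simp
      · rw [if_neg (by simp [List.isPrefixOf]; exact fun he => hc he.symm), ih _ _ _ hrest]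
        simp only [pvSplit, hc, if_false]
        cases pvSplit rest <;> simp

theorem pvSplitStr (s : String) :
    (PySem.Str.split? s ",").getD [] = (pvSplit s.toList).map String.ofList := by
  simp only [PySem.Str.split?, PySem.Chars.split?]
  rw [show (",".toList) = [','] from rfl]
  simp only [List.isEmpty_cons, if_false, Bool.false_eq_true, PySem.Chars.splitOn,
    Option.map_some, Option.getD_some]
  rw [pvGoComma _ _ _ _ (by omega)]
  cases pvSplit s.toList <;> simp

set_option maxHeartbeats 1000000 in
set_option maxRecDepth 100000 in
theorem pvHc0 : (pvSplit ("flood,storm,cyclone,landslide,rain,drought,monsoon,weather,forecast,climate,reservoir,dam,water level,irrigation,rainfall,atmospheric,meteorological,temperature,heat,wind,warning,alert,disaster,natural hazard,tsunami,earthquake,humidity,precipitation").toList).map String.ofList = ["flood", "storm", "cyclone", "landslide", "rain", "drought", "monsoon",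
    "weather", "forecast", "climate", "reservoir", "dam", "water level",
    "irrigation", "rainfall", "atmospheric", "meteorological", "temperature",
    "heat", "wind", "warning", "alert", "disaster", "natural hazard",
    "tsunami", "earthquake", "humidity", "precipitation"] := by decide

set_option maxHeartbeats 1000000 in
set_option maxRecDepth 100000 in
theorem pvHc1 : (pvSplit ("traffic,accident,train,bus,highway,road,railway,airport,flight,transport,vehicle,locomotive,station,port,shipping,cargo,freight,airline,aviation,driver,passenger,commute,expressway,bridge,tunnel,logistics,fleet,transit,ticket,departure,arrival,collision").toList).map String.ofList = ["traffic", "accident", "train", "bus", "highway", "road", "railway",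
    "airport", "flight", "transport", "vehicle", "locomotive", "station",
    "port", "shipping", "cargo", "freight", "airline", "aviation", "driver",
    "passenger", "commute", "expressway", "bridge", "tunnel", "logistics",
    "fleet", "transit", "ticket", "departure", "arrival", "collision"] := by decide

set_option maxHeartbeats 1000000 in
set_option maxRecDepth 100000 in
theorem pvHc2 : (pvSplit ("outage,power,water cut,fuel,gas,electricity,energy,oil,petrol,diesel,utility,grid,ceb,cpc,renewable,solar,wind power,hydro,coal,plant,refinery,cylinder,shortage,tariff,bill,generation,breakdown,maintenance,supply,kerosene,litro,laugfs,station").toList).map String.ofList = ["outage", "power", "water cut", "fuel", "gas", "electricity", "energy",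
    "oil", "petrol", "diesel", "utility", "grid", "ceb", "cpc", "renewable",
    "solar", "wind power", "hydro", "coal", "plant", "refinery", "cylinder",
    "shortage", "tariff", "bill", "generation", "breakdown", "maintenance",
    "supply", "kerosene", "litro", "laugfs", "station"] := by decide

set_option maxHeartbeats 1000000 in
set_option maxRecDepth 100000 in
theorem pvHc3 : (pvSplit ("disease,infection,hospital,medical,health,virus,pandemic,dengue,medicine,doctor,nurse,clinic,patient,treatment,drug,pharmaceutical,vaccine,surgery,emergency,ambulance,ministry of health,nutrition,wellness,mental health,sanitation,hygiene,epidemic,fever,cancer,diabetes").toList).map String.ofList = ["disease", "infection", "hospital", "medical", "health", "virus",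
    "pandemic", "dengue", "medicine", "doctor", "nurse", "clinic", "patient",
    "treatment", "drug", "pharmaceutical", "vaccine", "surgery", "emergency",
    "ambulance", "ministry of health", "nutrition", "wellness", "mental health",
    "sanitation", "hygiene", "epidemic", "fever", "cancer", "diabetes"] := by decide

set_option maxHeartbeats 1000000 in
set_option maxRecDepth 100000 in
theorem pvHc4 : (pvSplit ("crime,arrest,violence,attack,police,military,security,defense,navy,army,court,legal,law,enforcement,custody,prison,jail,suspect,investigation,cid,air force,troops,border,smuggling,illegal,operation,weapon,drug bust,narcotics,terrorism,intelligence,officer").toList).map String.ofList = ["crime", "arrest", "violence", "attack", "police", "military", "security",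
    "defense", "navy", "army", "court", "legal", "law", "enforcement",
    "custody", "prison", "jail", "suspect", "investigation", "cid", "air force",
    "troops", "border", "smuggling", "illegal", "operation", "weapon", "drug bust",
    "narcotics", "terrorism", "intelligence", "officer"] := by decide

set_option maxHeartbeats 1000000 in
set_option maxRecDepth 100000 in
theorem pvHc5 : (pvSplit ("inflation,investment,trade,market,stock,currency,rupee,bank,interest rate,economy,finance,tax,budget,gdp,cpi,colombo stock exchange,cse,shares,bond,treasury,debt,loan,imf,world bank,central bank,cbsl,export,import,customs,tariff,duty,salary,wage,price,cost,business,industry,profit,loss,funding").toList).map String.ofList = ["inflation", "investment", "trade", "market", "stock", "currency",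
    "rupee", "bank", "interest rate", "economy", "finance", "tax", "budget",
    "gdp", "cpi", "colombo stock exchange", "cse", "shares", "bond", "treasury",
    "debt", "loan", "imf", "world bank", "central bank", "cbsl", "export",
    "import", "customs", "tariff", "duty", "salary", "wage", "price", "cost",
    "business", "industry", "profit", "loss", "funding"] := by decide

set_option maxHeartbeats 1000000 in
set_option maxRecDepth 100000 in
theorem pvHc6 : (pvSplit ("protest,public opinion,social media,trend,viral,sentiment,outcry,campaign,boycott,strike,demonstration,poll,survey,election,vote,voter,community,social,society,civil,rights,activist,union,opposition,demand,petition,complaint,feedback,review,comment,discussion,debate,speech,rally,march,gathering,movement,public,people,citizens,population,government,president,minister,parliament,policy,issue,concern,crisis,develop,situation,matter").toList).map String.ofList = ["protest", "public opinion", "social media", "trend", "viral", "sentiment",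
    "outcry", "campaign", "boycott", "strike", "demonstration",
    "poll", "survey", "election", "vote", "voter", "community", "social",
    "society", "civil", "rights", "activist", "union", "opposition",
    "demand", "petition", "complaint", "feedback", "review", "comment",
    "discussion", "debate", "speech", "rally", "march", "gathering",
    "movement", "public", "people", "citizens", "population",
    "government", "president", "minister", "parliament", "policy",
    "issue", "concern", "crisis", "develop", "situation", "matter"] := by decide

theorem pvRawB_split : pvRawB.map (fun p => (p.1, (PySem.Str.split? p.2 ",").getD [])) = pvTable := by
  rw [show (fun p : String × String => (p.1, (PySem.Str.split? p.2 ",").getD []))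
        = (fun p : String × String => (p.1, (pvSplit p.2.toList).map String.ofList))
      from funext (fun p => by rw [pvSplitStr])]
  simp only [pvRawB, List.map_cons, List.map_nil, pvHc0, pvHc1, pvHc2, pvHc3, pvHc4, pvHc5, pvHc6]
  rfl

theorem pvCats_eq : pvCats = pvTable.map (fun cw => cw.1) := by decide

-- all (keyword, category) pairs of the table, keyword first
def pvPairs : List (String × String) := pvTable.flatMap (fun cw => cw.2.map (fun w => (w, cw.1)))

theorem pvAnyWord_eq_any (t : String) (ws : List String) :
    pvAnyWord t ws = ws.any (fun w => PySem.Str.isIn w t) := by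
  induction ws with
  | nil => rfl
  | cons w ws ih =>
    cases h : PySem.Chars.isIn w.toList t.toList <;> simp [pvAnyWord, h, ih]

theorem pvMemFoldl {α : Type} (l : List α) (F : PySem.Set String → α → PySem.Set String)
    (Q : α → Prop) (c : String) (h : ∀ s x, c ∈ F s x ↔ c ∈ s ∨ Q x) :
    ∀ s, c ∈ l.foldl F s ↔ c ∈ s ∨ ∃ x ∈ l, Q x := by
  induction l with
  | nil => simp
  | cons x l ih =>
    intro s
    simp only [List.foldl_cons, ih, h, List.mem_cons]
    constructor
    · rintro ((hs | hq) | ⟨y, hy, hQ⟩)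
      · exact Or.inl hs
      · exact Or.inr ⟨x, Or.inl rfl, hq⟩
      · exact Or.inr ⟨y, Or.inr hy, hQ⟩
    · rintro (hs | ⟨y, (rfl | hy), hQ⟩)
      · exact Or.inl (Or.inl hs)
      · exact Or.inl (Or.inr hQ)
      · exact Or.inr ⟨y, hy, hQ⟩

theorem pvFoldlFlatMap {α β γ : Type} (l : List α) (g : α → List β) (f : γ → β → γ) (init : γ) :
    (l.flatMap g).foldl f init = l.foldl (fun acc x => (g x).foldl f acc) init := by
  induction l generalizing init with
  | nil => rfl
  | cons x l ih => simp [List.flatMap_cons, List.foldl_append, ih]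

theorem pvKw2Cats_eq :
    pvKw2Cats = pvPairs.foldl (fun d p => d.modify p.1 [] (fun cs => cs ++ [p.2])) PySem.Dict.empty := by
  rw [pvKw2Cats, pvPairs, pvFoldlFlatMap]
  have hfold : ∀ (l : List (String × String)) (d : PySem.Dict String (List String)),
      l.foldl (fun d p => ((PySem.Str.split? p.2 ",").getD []).foldl
        (fun d w => d.modify w [] (fun cs => cs ++ [p.1])) d) d
      = (l.map (fun p => (p.1, (PySem.Str.split? p.2 ",").getD []))).foldl
        (fun d cw => cw.2.foldl (fun d w => d.modify w [] (fun cs => cs ++ [cw.1])) d) d := by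
    intro l
    induction l with
    | nil => intro d; rfl
    | cons p l ih => intro d; simp only [List.foldl_cons, List.map_cons, ih]
  rw [hfold, pvRawB_split]
  congr 1
  funext d cw
  rw [List.foldl_map]

theorem pvMemGetD (w c : String) :
    c ∈ pvKw2Cats.getD w [] ↔ (w, c) ∈ pvPairs := by
  rw [pvKw2Cats_eq, PySem.Dict.getD_foldl_modify_append]
  simp only [PySem.Dict.getD_empty, List.nil_append, List.mem_map, List.mem_filter]
  constructor
  · rintro ⟨⟨a, b⟩, ⟨hmem, hbeq⟩, rfl⟩
    simp only [beq_iff_eq] at hbeq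
    subst hbeq; exact hmem
  · intro hmem
    exact ⟨(w, c), ⟨hmem, by simp⟩, rfl⟩

set_option maxHeartbeats 1000000 in
set_option maxRecDepth 100000 in
theorem pvLens_eq : pvLens = [3, 4, 5, 6, 7, 8, 9, 10, 11, 12, 13, 14, 18, 22] := by
  unfold pvLens
  rw [pvKw2Cats_eq]
  decide

theorem pvNodupCats : (pvTable.map (fun cw => cw.1)).Nodup := by decide

set_option maxRecDepth 10000 in
theorem pvWordFacts : ∀ cw ∈ pvTable, ∀ w ∈ cw.2, w.toList ≠ [] ∧ ((w.toList.length : Int)) ∈ pvLens := by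
  rw [pvLens_eq]; decide

-- the hit set of B, named for the proofs
def pvHit (t : String) : PySem.Set String :=
  let n := PySem.Str.len t
  (PySem.List.pyRange 0 n 1).foldl (fun hit i =>
    pvLens.foldl (fun hit L =>
      if L ≤ n - i then
        PySem.Set.update hit (pvKw2Cats.getD (PySem.Str.slice t (some i) (some (i + L))) [])
      else hit) hit) PySem.Set.empty

theorem pvMemHit (t c : String) :
    c ∈ pvHit t ↔ ∃ i, (0 ≤ i ∧ i < PySem.Str.len t) ∧ ∃ L ∈ pvLens,
      L ≤ PySem.Str.len t - i ∧ c ∈ pvKw2Cats.getD (PySem.Str.slice t (some i) (some (i + L))) [] := by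
  have hin : ∀ (i : Int) (s : PySem.Set String),
      c ∈ pvLens.foldl (fun hit L =>
        if L ≤ PySem.Str.len t - i then
          PySem.Set.update hit (pvKw2Cats.getD (PySem.Str.slice t (some i) (some (i + L))) [])
        else hit) s
      ↔ c ∈ s ∨ ∃ L ∈ pvLens, L ≤ PySem.Str.len t - i ∧
          c ∈ pvKw2Cats.getD (PySem.Str.slice t (some i) (some (i + L))) [] := by
    intro i s
    refine pvMemFoldl pvLens _ _ c (fun s L => ?_) s
    split_ifs with h
    · rw [PySem.Set.mem_update]
      exact ⟨fun hm => hm.imp id (fun hg => ⟨h, hg⟩), fun hm => hm.imp id And.right⟩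
    · exact ⟨Or.inl, fun hm => hm.elim id (fun hg => absurd hg.1 h)⟩
  unfold pvHit
  rw [pvMemFoldl (PySem.List.pyRange 0 (PySem.Str.len t) 1) _
      (fun i => ∃ L ∈ pvLens, L ≤ PySem.Str.len t - i ∧
        c ∈ pvKw2Cats.getD (PySem.Str.slice t (some i) (some (i + L))) []) c
      (fun s i => hin i s)]
  have : c ∉ PySem.Set.empty (α := String) := by simp [PySem.Set.empty]
  simp only [this, false_or]
  constructor
  · rintro ⟨i, hi, hQ⟩
    exact ⟨i, (PySem.List.mem_pyRange_one.mp hi).imp_left id, hQ⟩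
  · rintro ⟨i, hi, hQ⟩
    exact ⟨i, PySem.List.mem_pyRange_one.mpr hi, hQ⟩

-- the crux: a category is hit iff one of its keywords occurs in the text
theorem pvHit_iff_any (t : String) (cw : String × List String) (hcw : cw ∈ pvTable) :
    cw.1 ∈ pvHit t ↔ ∃ w ∈ cw.2, PySem.Str.isIn w t = true := by
  have hlen_t : PySem.Str.len t = (t.toList.length : Int) := rfl
  rw [pvMemHit]
  constructor
  · rintro ⟨i, ⟨hi0, hin⟩, L, hL, hLle, hc⟩
    rw [pvMemGetD] at hc
    rcases List.mem_flatMap.mp hc with ⟨cw', hcw', hpair⟩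
    rcases List.mem_map.mp hpair with ⟨w, hw, hwe⟩
    have hfst : cw'.1 = cw.1 := ((Prod.mk.injEq _ _ _ _).mp hwe).2
    have heq : cw' = cw := List.inj_on_of_nodup_map pvNodupCats hcw' hcw hfst
    subst heq
    have hkey : w = PySem.Str.slice t (some i) (some (i + L)) :=
      ((Prod.mk.injEq _ _ _ _).mp hwe).1
    refine ⟨w, hw, ?_⟩
    rw [PySem.Str.isIn_iff_infix, hkey]
    have hL0 : (0:Int) ≤ L := by
      rw [pvLens_eq] at hL; fin_cases hL <;> norm_num
    have hiL : (0:Int) ≤ i + L := by omega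
    have hslice : (PySem.Str.slice t (some i) (some (i + L))).toList
        = (t.toList.drop i.toNat).take ((i + L).toNat - i.toNat) := by
      simp only [PySem.Str.slice, String.toList_ofList, PySem.Chars.slice_eq_listSlice]
      rw [PySem.List.slice_toNat _ hi0 hiL]
    rw [hslice]
    exact ((List.take_prefix _ _).isInfix).trans ((List.drop_suffix _ _).isInfix)
  · rintro ⟨w, hw, hisin⟩
    obtain ⟨hne, hlen⟩ := pvWordFacts cw hcw w hw
    rw [PySem.Str.isIn_iff_infix] at hisin
    obtain ⟨j, hpre⟩ := (PySem.Chars.exists_prefix_drop_iff_isIn w.toList t.toList).mpr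
      ((PySem.Chars.isIn_iff_infix _ _).mpr hisin)
    have hjlt : j < t.toList.length := by
      by_contra hge
      have hdrop : t.toList.drop j = [] := List.drop_eq_nil_of_le (by omega)
      rw [hdrop, List.prefix_nil] at hpre
      exact hne hpre
    have hwlen : w.toList.length ≤ t.toList.length - j := by
      have h1 := hpre.length_le
      rw [List.length_drop] at h1
      omega
    refine ⟨(j : Int), ⟨Int.natCast_nonneg j, ?_⟩, (w.toList.length : Int), hlen, ?_, ?_⟩
    · rw [hlen_t]; exact_mod_cast hjlt
    · rw [hlen_t]; omega
    · rw [pvMemGetD]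
      have hkey : PySem.Str.slice t (some (j : Int)) (some ((j : Int) + (w.toList.length : Int))) = w := by
        apply String.toList_inj.mp
        have : (PySem.Str.slice t (some (j : Int)) (some ((j : Int) + (w.toList.length : Int)))).toList
            = (t.toList.drop j).take w.toList.length := by
          simp only [PySem.Str.slice, String.toList_ofList, PySem.Chars.slice_eq_listSlice]
          rw [PySem.List.slice_natCast_add]
        rw [this]
        exact (List.prefix_iff_eq_take.mp hpre).symm
      rw [hkey]
      exact List.mem_flatMap.mpr ⟨cw, hcw, List.mem_map.mpr ⟨w, hw, rfl⟩⟩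

theorem pvTags_eq (t : String) :
    pvTable.foldl (fun tags cw => if pvAnyWord t cw.2 then tags ++ [cw.1] else tags) []
      = pvCats.filter (fun c => PySem.Set.contains (pvHit t) c) := by
  rw [PySem.List.foldl_append_if (fun cw => pvAnyWord t cw.2) (fun cw => cw.1) pvTable []]
  rw [List.nil_append, pvCats_eq, List.filter_map]
  congr 1
  apply List.filter_congr
  intro cw hcw
  simp only [Function.comp]
  rw [Bool.eq_iff_iff, pvAnyWord_eq_any, PySem.Set.contains_iff, pvHit_iff_any t cw hcw]
  simp

-- ===== VERDICT (by name: the statement is the Claim_ definition above) =====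
theorem tag_ops_spec : Claim_equal_tag_ops := by
  intro text _
  unfold Spec_tag_ops
  show tag_ops text = tag_ops_alt text
  simp only [tag_ops, tag_ops_alt]
  rw [pvTags_eq (PySem.Str.lower text)]
  rfl
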